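-- pv_equiv track=rewrite | github.com/ZAS-QUEST/eldpy | eldpy/helpers.py | get_translation_retain
-- ===== SOURCE A (Python) =====
-- def get_translation_retain(tmp_translations_dict, logger=None):
--     """
--     among the tiers given, retrieve the tier which is most likely
--     to be a translation tier
--     """
--
--     translation_tier_to_retain = {}
--     translation_tiername_to_retain = ""
--     max_charcount = 0
--     for type_candidate in tmp_translations_dict:
--         for tier in tmp_translations_dict[type_candidate]:
--             charcount = 0
--             for top_element in tmp_translations_dict[type_candidate][tier]:
--                 charcount += len(
--                     tmp_translations_dict[type_candidate][tier][top_element]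
--                 )
--             if charcount >= max_charcount:
--                 max_charcount = charcount
--                 translation_tiername_to_retain = tier
--                 translation_tier_to_retain = tmp_translations_dict[type_candidate][tier]
--     if logger:
--         logger.info(
--             f"  retaining {translation_tiername_to_retain} as the tier with most characters ({max_charcount})"
--         )
--     return translation_tier_to_retain
-- ===== SOURCE B (Python) =====
-- def get_translation_retain(tmp_translations_dict, logger=None):
--     """
--     among the tiers given, retrieve the tier which is most likely
--     to be a translation tier
--     """
--     entries = []
--     for tiers in tmp_translations_dict.values():
--         for tiername, tier_dict in tiers.items():
--             entries.append((tiername, tier_dict, sum(len(v) for v in tier_dict.values())))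
--     ordered = sorted(entries, key=lambda e: e[2])
--     if ordered:
--         tiername, tier_dict, charcount = ordered[-1]
--     else:
--         tiername, tier_dict, charcount = "", {}, 0
--     if logger:
--         logger.info(
--             f"  retaining {tiername} as the tier with most characters ({charcount})"
--         )
--     return tier_dict
-- ===== Notes on version B (the rewrite author's own statement) =====
-- stated objective: alternative
-- what changed: Replaces A's one-pass running-maximum loop with mutable best-so-far state by a sort-based algorithm: flatten all tiers into (tiername, tier_dict, charcount) records, stable-sort them ascending by charcount, and return the tier of the last element (stability makes it the last maximal record, reproducing A's >= last-wins tie-break), with {} for empty input.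
import Mathlib
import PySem

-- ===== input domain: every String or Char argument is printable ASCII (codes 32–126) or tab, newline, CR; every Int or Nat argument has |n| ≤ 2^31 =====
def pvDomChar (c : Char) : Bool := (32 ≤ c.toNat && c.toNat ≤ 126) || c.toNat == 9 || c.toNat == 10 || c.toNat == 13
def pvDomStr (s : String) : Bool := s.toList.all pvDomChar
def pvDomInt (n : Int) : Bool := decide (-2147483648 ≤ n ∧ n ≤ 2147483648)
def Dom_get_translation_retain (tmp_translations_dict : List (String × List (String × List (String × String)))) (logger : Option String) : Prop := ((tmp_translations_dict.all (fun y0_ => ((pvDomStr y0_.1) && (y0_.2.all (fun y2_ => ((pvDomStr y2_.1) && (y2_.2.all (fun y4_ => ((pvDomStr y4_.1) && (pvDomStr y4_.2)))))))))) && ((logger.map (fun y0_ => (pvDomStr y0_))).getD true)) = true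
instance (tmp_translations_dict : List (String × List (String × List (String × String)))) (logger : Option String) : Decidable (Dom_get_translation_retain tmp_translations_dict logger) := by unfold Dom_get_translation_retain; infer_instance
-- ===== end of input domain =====

-- B replaces A's running-maximum loop by a sort-based algorithm: flatten all tiers into
-- (tiername, tier_dict, charcount) records, stable-sort ascending by charcount and take
-- the last record (stability makes it the last maximal one, A's >= tie-break).
-- The logger.info call is a side effect only; equivalence is about the return value.

-- ===== PORT A =====
def get_translation_retain (tmp_translations_dict : List (String × List (String × List (String × String)))) (logger : Option String) : List (String × String) :=
  let st := tmp_translations_dict.foldl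
    (fun st type_candidate =>
      type_candidate.2.foldl
        (fun st tier =>
          let charcount := tier.2.foldl
            (fun charcount top_element => charcount + PySem.Str.len top_element.2) (0 : Int)
          if st.2.2 ≤ charcount then (tier.2, tier.1, charcount) else st)
        st)
    (([] : List (String × String)), ("" : String), (0 : Int))
  st.1

-- ===== PORT B =====
def get_translation_retain_alt (tmp_translations_dict : List (String × List (String × List (String × String)))) (logger : Option String) : List (String × String) :=
  let entries : List (String × List (String × String) × Int) :=
    tmp_translations_dict.foldl (fun acc tiers =>
      tiers.2.foldl (fun acc tier =>
        acc ++ [(tier.1, tier.2,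
          tier.2.foldl (fun s v => s + PySem.Str.len v.2) (0 : Int))]) acc) []
  let ordered := PySem.List.sorted entries (fun e => e.2.2)
  -- 'if ordered: … = ordered[-1] else defaults; return tier_dict'
  match ordered.getLast? with
  | some e => e.2.1
  | none => []

-- ===== PRECONDITION & SPEC =====
-- Pre_ excludes a truthy logger (any nonempty string): there Python A (and B) raises
-- AttributeError on logger.info, since a plain string has no .info method.
def Pre_get_translation_retain (tmp_translations_dict : List (String × List (String × List (String × String)))) (logger : Option String) : Prop := logger.getD "" = ""
instance (tmp_translations_dict : List (String × List (String × List (String × String)))) (logger : Option String) : Decidable (Pre_get_translation_retain tmp_translations_dict logger) := by unfold Pre_get_translation_retain; infer_instance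
def pvWitness_get_translation_retain : (List (String × List (String × List (String × String)))) × Option String := ([("a", [("t1", [("x", "abc")])])], none)

def Spec_get_translation_retain (tmp_translations_dict : List (String × List (String × List (String × String)))) (logger : Option String) (out : List (String × String)) : Prop := out = get_translation_retain_alt tmp_translations_dict logger
instance (tmp_translations_dict : List (String × List (String × List (String × String)))) (logger : Option String) (out : List (String × String)) : Decidable (Spec_get_translation_retain tmp_translations_dict logger out) := by unfold Spec_get_translation_retain; infer_instance

-- ===== CLAIM =====
def Claim_equal_get_translation_retain : Prop := ∀ (tmp_translations_dict : List (String × List (String × List (String × String)))) (logger : Option String), Dom_get_translation_retain tmp_translations_dict logger → Pre_get_translation_retain tmp_translations_dict logger → Spec_get_translation_retain tmp_translations_dict logger (get_translation_retain tmp_translations_dict logger)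

-- ===== LEMMAS AND PROOFS =====

-- entry type: (tiername, tier_dict, charcount)
abbrev pvE : Type := String × List (String × String) × Int

def pvKey (e : pvE) : Int := e.2.2

-- A's loop body as a step function on its (dict, name, maxcount) state
def pvStep (st : List (String × String) × String × Int) (e : pvE) :
    List (String × String) × String × Int :=
  if st.2.2 ≤ e.2.2 then (e.2.1, e.1, e.2.2) else st

def pvConv (e : pvE) : List (String × String) × String × Int := (e.2.1, e.1, e.2.2)

def pvEntry (tier : String × List (String × String)) : pvE :=
  (tier.1, tier.2, tier.2.foldl (fun s v => s + PySem.Str.len v.2) (0 : Int))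

theorem pvCount_nonneg (td : List (String × String)) (c : Int) (hc : 0 ≤ c) :
    0 ≤ td.foldl (fun s v => s + PySem.Str.len v.2) c := by
  induction td generalizing c with
  | nil => exact hc
  | cons h t ih =>
      simp only [List.foldl]
      exact ih _ (by have := PySem.Str.len_eq h.2; omega)

-- unfolding equation for PySem.List.insertBy on a cons (rfl)
theorem pvInsertBy_cons (before : pvE → pvE → Bool) (x y : pvE) (ys : List pvE) :
    PySem.List.insertBy before x (y :: ys)
      = if before x y then x :: y :: ys else y :: PySem.List.insertBy before x ys := rfl

-- B's inner loop over one tiers dict appends that dict's entry records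
theorem pvInner (l : List (String × List (String × String))) (a : List pvE) :
    l.foldl (fun acc tier =>
      acc ++ [(tier.1, tier.2,
        tier.2.foldl (fun s v => s + PySem.Str.len v.2) (0 : Int))]) a
    = a ++ l.map pvEntry := by
  induction l generalizing a with
  | nil => simp
  | cons x xs ihx =>
      simp only [List.foldl]
      rw [ihx]
      simp [pvEntry]

-- B's entry-building double loop is the flatMap of pvEntry
theorem pvEntries_eq (tmp : List (String × List (String × List (String × String))))
    (acc : List pvE) :
    tmp.foldl (fun acc tiers =>
      tiers.2.foldl (fun acc tier =>
        acc ++ [(tier.1, tier.2,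
          tier.2.foldl (fun s v => s + PySem.Str.len v.2) (0 : Int))]) acc) acc
      = acc ++ tmp.flatMap (fun tiers => tiers.2.map pvEntry) := by
  induction tmp generalizing acc with
  | nil => simp
  | cons h t ih =>
      simp only [List.foldl, List.flatMap_cons]
      rw [ih, pvInner]
      simp

-- A's nested loop is the left fold of pvStep over the flat entry list
theorem pvFlatten (tmp : List (String × List (String × List (String × String)))) :
    (tmp.flatMap (fun tiers => tiers.2.map pvEntry)).foldl pvStep
        (([] : List (String × String)), ("" : String), (0 : Int))
      = tmp.foldl
        (fun st type_candidate =>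
          type_candidate.2.foldl
            (fun st tier =>
              let charcount := tier.2.foldl
                (fun charcount top_element => charcount + PySem.Str.len top_element.2) (0 : Int)
              if st.2.2 ≤ charcount then (tier.2, tier.1, charcount) else st)
            st)
        (([] : List (String × String)), ("" : String), (0 : Int)) := by
  rw [List.foldl_flatMap]
  have hfun : (fun (acc : List (String × String) × String × Int) (tc : String × List (String × List (String × String))) =>
      List.foldl pvStep acc (tc.2.map pvEntry))
      = (fun st type_candidate =>
          type_candidate.2.foldl
            (fun st tier =>
              let charcount := tier.2.foldl
                (fun charcount top_element => charcount + PySem.Str.len top_element.2) (0 : Int)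
              if st.2.2 ≤ charcount then (tier.2, tier.1, charcount) else st)
            st) := by
    funext st tc
    rw [List.foldl_map]
    rfl
  rw [hfun]

theorem pvEntry_nonneg (e : pvE) (tmp : List (String × List (String × List (String × String))))
    (he : e ∈ tmp.flatMap (fun tiers => tiers.2.map pvEntry)) : 0 ≤ e.2.2 := by
  simp only [List.mem_flatMap, List.mem_map] at he
  obtain ⟨tiers, _, tier, _, rfl⟩ := he
  exact pvCount_nonneg _ _ le_rfl

-- the last element of a Pairwise-≤ list bounds every element
theorem pvLast_max (l : List pvE) (m : pvE)
    (hp : l.Pairwise (fun a b => pvKey a ≤ pvKey b)) (hm : l.getLast? = some m) :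
    ∀ y ∈ l, pvKey y ≤ pvKey m := by
  induction l with
  | nil => simp at hm
  | cons x t ih =>
      cases t with
      | nil =>
          simp only [List.getLast?_singleton, Option.some.injEq] at hm
          subst hm; intro y hy; simp at hy; subst hy; exact le_rfl
      | cons b t' =>
          rw [List.getLast?_cons_cons] at hm
          have hp' := (List.pairwise_cons.mp hp).2
          have hx := (List.pairwise_cons.mp hp).1
          intro y hy
          rcases List.mem_cons.mp hy with rfl | hy'
          · have hbm : pvKey b ≤ pvKey m := ih hp' hm b (List.mem_cons_self)
            exact le_trans (hx b (List.mem_cons_self)) hbm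
          · exact ih hp' hm y hy'

-- inserting x strictly below the last element keeps the last element
theorem pvInsert_last (before : pvE → pvE → Bool) (x m : pvE) (ys : List pvE)
    (hm : ys.getLast? = some m) (hx : before x m = true) :
    (PySem.List.insertBy before x ys).getLast? = some m := by
  induction ys with
  | nil => simp at hm
  | cons y t ih =>
      cases t with
      | nil =>
          simp only [List.getLast?_singleton, Option.some.injEq] at hm
          subst hm
          simp only [PySem.List.insertBy, hx, if_true]
          rfl
      | cons b t' =>
          rw [List.getLast?_cons_cons] at hm
          rw [pvInsertBy_cons]
          split
          · rw [List.getLast?_cons_cons, List.getLast?_cons_cons]; exact hm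
          · have hrec := ih hm
            cases hins : PySem.List.insertBy before x (b :: t') with
            | nil => rw [pvInsertBy_cons] at hins; split at hins <;> simp_all
            | cons z zs =>
                rw [hins] at hrec
                rw [List.getLast?_cons_cons]
                exact hrec

-- MAIN: A's running-maximum fold equals pvConv of the last element of the stable sort
theorem pvMain (l : List pvE) (hl : ∀ a ∈ l, 0 ≤ a.2.2) (hne : l ≠ []) :
    ((PySem.List.sorted l pvKey).getLast?).map pvConv
      = some (l.foldl pvStep (([] : List (String × String)), ("" : String), (0 : Int))) := by
  induction l using List.reverseRecOn with
  | nil => exact absurd rfl hne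
  | append_singleton l e ih =>
      have he : 0 ≤ e.2.2 := hl e (by simp)
      rcases eq_or_ne l [] with rfl | hlne
      · simp only [List.nil_append, List.foldl]
        have hs : PySem.List.sorted [e] pvKey = [e] := by
          rw [PySem.List.sorted_eq_foldl_insertBy]
          rfl
        rw [hs]
        simp [pvConv, pvStep, he]
      · have hl' : ∀ a ∈ l, 0 ≤ a.2.2 := fun a ha => hl a (by simp [ha])
        have ihp := ih hl' hlne
        rw [List.foldl_append]
        simp only [List.foldl]
        -- sorted (l ++ [e]) = insertBy e (sorted l)
        have hsapp : PySem.List.sorted (l ++ [e]) pvKey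
            = PySem.List.insertBy (fun a b => decide (pvKey a < pvKey b)) e
                (PySem.List.sorted l pvKey) := by
          rw [PySem.List.sorted_eq_foldl_insertBy, PySem.List.sorted_eq_foldl_insertBy,
              List.foldl_append]
          rfl
        obtain ⟨m, hm⟩ : ∃ m, (PySem.List.sorted l pvKey).getLast? = some m := by
          cases hq : (PySem.List.sorted l pvKey).getLast? with
          | none =>
              rw [List.getLast?_eq_none_iff, PySem.List.sorted_eq_nil_iff] at hq
              exact absurd hq hlne
          | some m => exact ⟨m, rfl⟩
        rw [hm] at ihp
        have hfold : l.foldl pvStep (([] : List (String × String)), ("" : String), (0 : Int))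
            = pvConv m := by
          simpa using ihp.symm
        have hmax : ∀ y ∈ PySem.List.sorted l pvKey, pvKey y ≤ pvKey m :=
          pvLast_max _ m (PySem.List.sorted_pairwise l pvKey) hm
        rw [hsapp, hfold]
        by_cases hc : m.2.2 ≤ e.2.2
        · -- e becomes the new maximum: it is appended at the very end
          have hnb : ∀ y ∈ PySem.List.sorted l pvKey,
              (fun a b : pvE => decide (pvKey a < pvKey b)) e y = false := by
            intro y hy
            simp only [decide_eq_false_iff_not, not_lt]
            exact le_trans (hmax y hy) hc
          rw [PySem.List.insertBy_of_forall_not_before _ _ _ hnb]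
          rw [List.getLast?_concat]
          simp [pvStep, pvConv, hc]
        · -- e is strictly below the maximum: the last element stays m
          have hb : (fun a b : pvE => decide (pvKey a < pvKey b)) e m = true := by
            simp only [decide_eq_true_eq, pvKey]
            omega
          rw [pvInsert_last _ e m _ hm hb]
          simp [pvStep, pvConv, hc]

-- ===== VERDICT =====
theorem get_translation_retain_spec : Claim_equal_get_translation_retain := by
  intro tmp logger _ _
  unfold Spec_get_translation_retain get_translation_retain get_translation_retain_alt
  rw [pvEntries_eq tmp []]
  simp only [List.nil_append]
  rw [← pvFlatten tmp]
  have hmem : ∀ a ∈ tmp.flatMap (fun tiers => tiers.2.map pvEntry), (0:Int) ≤ a.2.2 :=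
    fun a ha => pvEntry_nonneg a tmp ha
  generalize hG : tmp.flatMap (fun tiers => tiers.2.map pvEntry) = entries at hmem ⊢
  rcases eq_or_ne entries [] with rfl | hne
  · rfl
  · have h := pvMain entries hmem hne
    obtain ⟨m, hm⟩ : ∃ m, (PySem.List.sorted entries pvKey).getLast? = some m := by
      cases hq : (PySem.List.sorted entries pvKey).getLast? with
      | none => rw [hq] at h; simp at h
      | some m => exact ⟨m, rfl⟩
    rw [hm] at h
    have hfold : entries.foldl pvStep (([] : List (String × String)), ("" : String), (0 : Int))
        = pvConv m := by simpa using h.symm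
    have hks : PySem.List.sorted entries (fun e : pvE => e.2.2)
        = PySem.List.sorted entries pvKey := rfl
    rw [hfold, hks, hm]
    rfl
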